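-- pv_equiv track=rewrite | github.com/naumovda/python | matrices.py | sum_cols_neg
-- ===== SOURCE A (Python) =====
-- def sum_cols_neg(matrix):
--     '''
--     Return sums of elements in columns that contain negative element
--     Parameters:
--     a: array
--         Input array
--     '''
--     col_sum = []
--     col_ex_neg = []
--
--     rows = len(matrix)
--     cols = len(matrix[0])
--
--     for j in range(cols):
--         col_sum.append(0)
--         col_ex_neg.append(False)
--
--     for i in range(rows):
--         for j in range(cols):
--             col_sum[j] += matrix[i][j]
--             if matrix[i][j] < 0:
--                 col_ex_neg[j] = True
--
--     sums = 0
--     exists = False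
--     for j in range(cols):
--         if col_ex_neg[j]:
--             exists = True
--             sums += col_sum[j]
--
--     if exists:
--         return sums
--
--     return None
-- ===== SOURCE B (Python) =====
-- def sum_cols_neg(matrix):
--     '''Return sums of elements in columns that contain negative element'''
--     total = 0
--     found = False
--     for col in zip(*matrix):
--         if any(x < 0 for x in col):
--             found = True
--             total += sum(col)
--     return total if found else None
-- ===== Notes on version B (the rewrite author's own statement) =====
-- stated objective: idiomatic
-- what changed: B transposes the matrix with zip(*matrix) and processes one column at a time (sum + any-negative), replacing A's row-major scan that maintains parallel col_sum/col_ex_neg arrays plus a separate final aggregation pass.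
import Mathlib
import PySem

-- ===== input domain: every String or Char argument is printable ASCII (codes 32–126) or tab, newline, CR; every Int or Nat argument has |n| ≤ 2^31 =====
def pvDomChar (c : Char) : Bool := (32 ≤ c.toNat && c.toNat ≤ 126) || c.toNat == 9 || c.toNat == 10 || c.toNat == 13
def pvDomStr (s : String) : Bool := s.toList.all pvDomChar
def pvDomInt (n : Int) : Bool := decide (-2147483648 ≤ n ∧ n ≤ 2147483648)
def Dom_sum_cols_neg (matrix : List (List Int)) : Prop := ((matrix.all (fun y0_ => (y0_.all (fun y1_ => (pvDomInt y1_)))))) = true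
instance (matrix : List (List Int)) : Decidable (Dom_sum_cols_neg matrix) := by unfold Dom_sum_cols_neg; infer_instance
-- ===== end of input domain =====

-- B transposes the matrix and handles one column at a time (sum + any-negative) instead of
-- maintaining parallel col_sum/col_ex_neg arrays across a row-major scan; same asymptotic cost, simpler code.

-- ===== PORT A =====
-- inner 'for j in range(cols)' loop of A's row scan, kept as a helper
def pvInner (cols : Int) (row : List Int) (p : List Int × List Bool) : List Int × List Bool :=
  (PySem.List.pyRange 0 cols).foldl (fun q j =>
    let v := PySem.List.pyGetD row j 0
    (PySem.List.pySetD q.1 j (PySem.List.pyGetD q.1 j 0 + v),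
     if v < 0 then PySem.List.pySetD q.2 j true else q.2)) p

def sum_cols_neg (matrix : List (List Int)) : Option Int :=
  let rows := PySem.List.len matrix
  let cols := PySem.List.len (PySem.List.pyGetD matrix 0 [])
  let init : List Int × List Bool :=
    (PySem.List.pyRange 0 cols).foldl (fun p _ => (p.1 ++ [(0:Int)], p.2 ++ [false])) ([], [])
  let st :=
    (PySem.List.pyRange 0 rows).foldl
      (fun p i => pvInner cols (PySem.List.pyGetD matrix i []) p) init
  let fin :=
    (PySem.List.pyRange 0 cols).foldl (fun (q : Int × Bool) j =>
      if PySem.List.pyGetD st.2 j false then (q.1 + PySem.List.pyGetD st.1 j 0, true) else q)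
      ((0:Int), false)
  if fin.2 then some fin.1 else none

-- ===== PORT B =====
-- zip(*matrix): columns of the matrix, truncated to the shortest row; empty for no rows
def pvZipStar (matrix : List (List Int)) : List (List Int) :=
  match matrix with
  | [] => []
  | r :: rs =>
    let n := rs.foldl (fun m row => min m row.length) r.length
    (List.range n).map (fun j => (r :: rs).map (fun row => row.getD j 0))

def sum_cols_neg_alt (matrix : List (List Int)) : Option Int :=
  let fin := (pvZipStar matrix).foldl
    (fun (q : Int × Bool) col =>
      if col.any (fun x => decide (x < 0)) then (q.1 + col.sum, true) else q)
    ((0:Int), false)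
  if fin.2 then some fin.1 else none

-- ===== PRECONDITION & SPEC =====
-- Pre_ excludes exactly the inputs on which A raises IndexError: the empty matrix
-- (matrix[0]) and ragged matrices with a row shorter than the first row (matrix[i][j]).
def Pre_sum_cols_neg (matrix : List (List Int)) : Prop :=
  matrix ≠ [] ∧ ∀ row ∈ matrix, (matrix.headD []).length ≤ row.length
instance (matrix : List (List Int)) : Decidable (Pre_sum_cols_neg matrix) := by
  unfold Pre_sum_cols_neg; infer_instance

def pvWitness_sum_cols_neg : List (List Int) := [[1, -2], [3, 4]]

def Spec_sum_cols_neg (matrix : List (List Int)) (out : Option Int) : Prop := out = sum_cols_neg_alt matrix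
instance (matrix : List (List Int)) (out : Option Int) : Decidable (Spec_sum_cols_neg matrix out) := by unfold Spec_sum_cols_neg; infer_instance

-- ===== CLAIM (what is proved, stated in full; the proofs are below) =====
def Claim_equal_sum_cols_neg : Prop := ∀ (matrix : List (List Int)), Dom_sum_cols_neg matrix → Pre_sum_cols_neg matrix → Spec_sum_cols_neg matrix (sum_cols_neg matrix)

-- ===== LEMMAS AND PROOFS =====

-- running min of row lengths stays at m when every row is at least m long
lemma pv_foldl_min (rs : List (List Int)) : ∀ (m : Nat),
    (∀ row ∈ rs, m ≤ row.length) →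
    rs.foldl (fun a row => min a row.length) m = m := by
  induction rs with
  | nil => intro m _; rfl
  | cons r rs ih =>
    intro m h
    simp only [List.foldl_cons]
    rw [min_eq_left (h r (by simp))]
    exact ih m (fun row hr => h row (by simp [hr]))

-- the init loop builds two replicate lists
lemma pv_init (c : Nat) :
    (PySem.List.pyRange 0 (c : Int)).foldl
      (fun (p : List Int × List Bool) _ => (p.1 ++ [(0:Int)], p.2 ++ [false])) ([], [])
    = (List.replicate c 0, List.replicate c false) := by
  rw [PySem.List.pyRange_zero_nat, List.foldl_map]
  induction c with
  | zero => rfl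
  | succ n ih =>
    rw [List.range_succ, List.foldl_append, ih]
    simp [List.replicate_succ']

-- the inner-loop body of pvInner, with a Nat index (used only by the proofs)
def pvStepN (row : List Int) (q : List Int × List Bool) (k : Nat) : List Int × List Bool :=
  let v := PySem.List.pyGetD row (k : Int) 0
  (PySem.List.pySetD q.1 (k : Int) (PySem.List.pyGetD q.1 (k : Int) 0 + v),
   if v < 0 then PySem.List.pySetD q.2 (k : Int) true else q.2)

lemma pv_getD_replicate {alpha : Type} (c j : Nat) (a : alpha) :
    (List.replicate c a).getD j a = a := by
  simp [List.getD, List.getElem?_replicate]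
  split <;> rfl

-- elementwise effect of the inner j-loop restricted to the first n indices
lemma pv_inner_aux (row : List Int) (n : Nat) :
    ∀ (p : List Int × List Bool), n ≤ p.1.length → n ≤ p.2.length →
    ((List.range n).foldl (pvStepN row) p).1.length = p.1.length
    ∧ ((List.range n).foldl (pvStepN row) p).2.length = p.2.length
    ∧ (∀ j : Nat,
        ((List.range n).foldl (pvStepN row) p).1.getD j 0
        = if j < n then p.1.getD j 0 + row.getD j 0 else p.1.getD j 0)
    ∧ (∀ j : Nat,
        ((List.range n).foldl (pvStepN row) p).2.getD j false
        = if j < n then (p.2.getD j false || decide (row.getD j 0 < 0)) else p.2.getD j false) := by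
  induction n with
  | zero => intro p _ _; simp
  | succ n ih =>
    intro p h1 h2
    rw [List.range_succ, List.foldl_append, List.foldl_cons, List.foldl_nil]
    obtain ⟨l1, l2, g1, g2⟩ := ih p (by omega) (by omega)
    set r := (List.range n).foldl (pvStepN row) p with hr
    have hn1 : n < r.1.length := by omega
    have hn2 : n < r.2.length := by omega
    have hv : PySem.List.pyGetD row (n : Int) 0 = row.getD n 0 :=
      PySem.List.pyGetD_natCast row n 0
    refine ⟨?_, ?_, ?_, ?_⟩
    · simp only [pvStepN, PySem.List.length_pySetD]; exact l1
    · simp only [pvStepN]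
      split
      · rw [PySem.List.length_pySetD]; exact l2
      · exact l2
    · intro j
      have : ((pvStepN row r n).1).getD j 0
          = PySem.List.pyGetD (PySem.List.pySetD r.1 (n : Int)
              (PySem.List.pyGetD r.1 (n : Int) 0 + PySem.List.pyGetD row (n : Int) 0)) (j : Int) 0 := by
        rw [PySem.List.pyGetD_natCast]; rfl
      rw [this, PySem.List.pyGetD_pySetD_natCast _ _ _ _ _ hn1]
      by_cases hjn : j = n
      · subst hjn
        rw [if_pos rfl, PySem.List.pyGetD_natCast, PySem.List.pyGetD_natCast, g1 j,
          if_neg (by omega), if_pos (by omega)]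
      · rw [if_neg hjn, PySem.List.pyGetD_natCast, g1 j]
        by_cases hlt : j < n
        · rw [if_pos hlt, if_pos (by omega)]
        · rw [if_neg hlt, if_neg (by omega)]
    · intro j
      simp only [pvStepN, hv]
      split
      · -- row.getD n 0 < 0 : flags set to true at n
        rename_i hneg
        have : (PySem.List.pySetD r.2 (n : Int) true).getD j false
            = PySem.List.pyGetD (PySem.List.pySetD r.2 (n : Int) true) (j : Int) false := by
          rw [PySem.List.pyGetD_natCast]
        rw [this, PySem.List.pyGetD_pySetD_natCast _ _ _ _ _ hn2]
        by_cases hjn : j = n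
        · subst hjn
          rw [if_pos rfl, if_pos (by omega), decide_eq_true hneg, Bool.or_true]
        · rw [if_neg hjn, PySem.List.pyGetD_natCast, g2 j]
          by_cases hlt : j < n
          · rw [if_pos hlt, if_pos (by omega)]
          · rw [if_neg hlt, if_neg (by omega)]
      · rename_i hnneg
        rw [g2 j]
        by_cases hjn : j = n
        · subst hjn
          rw [if_neg (by omega), if_pos (by omega), decide_eq_false hnneg, Bool.or_false]
        · by_cases hlt : j < n
          · rw [if_pos hlt, if_pos (by omega)]
          · rw [if_neg hlt, if_neg (by omega)]

-- pvInner is the Nat-indexed fold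
lemma pv_inner_eq (c : Nat) (row : List Int) (p : List Int × List Bool) :
    pvInner (c : Int) row p = (List.range c).foldl (pvStepN row) p := by
  unfold pvInner
  rw [PySem.List.pyRange_zero_nat, List.foldl_map]
  rfl

-- what pvInner computes, in Nat-index terms
lemma pv_inner_spec (c : Nat) (row : List Int) (p : List Int × List Bool)
    (h1 : p.1.length = c) (h2 : p.2.length = c) :
    (pvInner (c : Int) row p).1.length = c
    ∧ (pvInner (c : Int) row p).2.length = c
    ∧ (∀ j : Nat, j < c →
        (pvInner (c : Int) row p).1.getD j 0 = p.1.getD j 0 + row.getD j 0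
        ∧ (pvInner (c : Int) row p).2.getD j false
          = (p.2.getD j false || decide (row.getD j 0 < 0))) := by
  rw [pv_inner_eq]
  obtain ⟨l1, l2, g1, g2⟩ := pv_inner_aux row c p (by omega) (by omega)
  refine ⟨by rw [l1, h1], by rw [l2, h2], fun j hj => ⟨?_, ?_⟩⟩
  · rw [g1 j, if_pos hj]
  · rw [g2 j, if_pos hj]

-- what the whole row-major scan computes, column by column
lemma pv_outer_spec (c : Nat) (rows : List (List Int)) :
    ∀ (p : List Int × List Bool), p.1.length = c → p.2.length = c →
    ((rows.foldl (fun p row => pvInner (c : Int) row p) p).1.length = c)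
    ∧ ((rows.foldl (fun p row => pvInner (c : Int) row p) p).2.length = c)
    ∧ (∀ j : Nat, j < c →
        (rows.foldl (fun p row => pvInner (c : Int) row p) p).1.getD j 0
          = p.1.getD j 0 + (rows.map (fun row => row.getD j 0)).sum
        ∧ (rows.foldl (fun p row => pvInner (c : Int) row p) p).2.getD j false
          = (p.2.getD j false || rows.any (fun row => decide (row.getD j 0 < 0)))) := by
  induction rows with
  | nil => intro p h1 h2; simp [h1, h2]
  | cons row rows ih =>
    intro p h1 h2
    rw [List.foldl_cons]
    obtain ⟨i1, i2, ig⟩ := pv_inner_spec c row p h1 h2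
    obtain ⟨o1, o2, og⟩ := ih (pvInner (c : Int) row p) i1 i2
    refine ⟨o1, o2, fun j hj => ?_⟩
    obtain ⟨og1, og2⟩ := og j hj
    obtain ⟨ig1, ig2⟩ := ig j hj
    constructor
    · rw [og1, ig1, List.map_cons, List.sum_cons]; ring
    · rw [og2, ig2, List.any_cons, Bool.or_assoc]

-- ===== VERDICT (by name: the statement is the Claim_ definition above) =====
theorem sum_cols_neg_spec : Claim_equal_sum_cols_neg := by
  intro matrix _ hpre
  unfold Spec_sum_cols_neg
  obtain ⟨hne, hrows⟩ := hpre
  cases matrix with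
  | nil => exact absurd rfl hne
  | cons r rs =>
    have hhead : ((r :: rs).headD []) = r := rfl
    rw [hhead] at hrows
    have hrs : ∀ row ∈ rs, r.length ≤ row.length := fun row hrm => hrows row (by simp [hrm])
    simp only [sum_cols_neg, sum_cols_neg_alt, pvZipStar, PySem.List.pyGetD_zero_cons,
      PySem.List.len_eq, pv_init, pv_foldl_min rs r.length hrs,
      PySem.List.foldl_pyRange_zero_pyGetD' (r :: rs) [] (fun p row => pvInner (r.length : Int) row p)]
    obtain ⟨_, _, hg⟩ := pv_outer_spec r.length (r :: rs)
      (List.replicate r.length 0, List.replicate r.length false) (by simp) (by simp)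
    rw [PySem.List.pyRange_zero_nat, List.foldl_map, List.foldl_map]
    have hfold :
        List.foldl
          (fun (q : Int × Bool) (k : Nat) =>
            if PySem.List.pyGetD ((r :: rs).foldl (fun p row => pvInner (r.length : Int) row p)
                  (List.replicate r.length 0, List.replicate r.length false)).2 (k : Int) false then
              (q.1 + PySem.List.pyGetD ((r :: rs).foldl (fun p row => pvInner (r.length : Int) row p)
                  (List.replicate r.length 0, List.replicate r.length false)).1 (k : Int) 0, true)
            else q)
          ((0 : Int), false) (List.range r.length)
        = List.foldl
          (fun (q : Int × Bool) (k : Nat) =>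
            if ((r :: rs).map (fun row => row.getD k 0)).any (fun x => decide (x < 0)) then
              (q.1 + ((r :: rs).map (fun row => row.getD k 0)).sum, true)
            else q)
          ((0 : Int), false) (List.range r.length) := by
      apply PySem.List.foldl_congr_mem
      intro acc k hk
      obtain ⟨h1, h2⟩ := hg k (List.mem_range.mp hk)
      simp only [PySem.List.pyGetD_natCast, h1, h2, pv_getD_replicate, Bool.false_or,
        zero_add, List.any_map, Function.comp_def]
    rw [hfold]
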